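-- pv_equiv track=rewrite | github.com/digitalemuendigkeit/algowatch-datenspende | helpers.py | get_domain_indices
-- ===== SOURCE A (Python) =====
-- def get_domain_indices(url_map, domains):
--    '''
--       returns for each domain the index of the first url starting with the domain
--       NB: only works with trimmed urls (protocoll and www removed)
--    '''
--    indices = {}
--    for domain in domains:
--       for url, idx in url_map.items():
--          if url.startswith(domain):
--             indices[domain] = idx
--             break
--    return indices
-- ===== SOURCE B (Python) =====
-- def get_domain_indices(url_map, domains):
--     # one pass over the urls: scan each url's prefixes against a domain set,
--     # recording the first matching url's index per domain
--     dset = set(domains)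
--     found = {}
--     for url, idx in url_map.items():
--         for i in range(len(url) + 1):
--             p = url[:i]
--             if p in dset and p not in found:
--                 found[p] = idx
--     return {d: found[d] for d in domains if d in found}
-- ===== Notes on version B (the rewrite author's own statement) =====
-- stated objective: faster
-- what changed: Instead of scanning all urls once per domain, B makes a single pass over the urls, checking each url's prefixes against a set of the domains and recording the first matching url's index per domain, then emits the result in domains order.
import Mathlib
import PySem

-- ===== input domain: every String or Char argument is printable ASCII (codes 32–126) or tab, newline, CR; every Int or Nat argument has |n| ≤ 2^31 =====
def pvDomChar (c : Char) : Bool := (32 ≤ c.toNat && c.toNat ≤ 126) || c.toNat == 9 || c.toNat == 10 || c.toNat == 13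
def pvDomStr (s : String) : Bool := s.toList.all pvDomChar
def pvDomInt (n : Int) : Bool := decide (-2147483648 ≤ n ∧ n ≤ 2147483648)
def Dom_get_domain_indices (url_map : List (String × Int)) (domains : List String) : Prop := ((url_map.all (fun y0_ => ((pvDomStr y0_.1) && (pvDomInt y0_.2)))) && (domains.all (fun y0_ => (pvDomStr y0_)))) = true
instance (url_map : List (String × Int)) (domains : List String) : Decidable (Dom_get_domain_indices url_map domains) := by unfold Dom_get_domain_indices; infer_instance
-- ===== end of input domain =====

-- B replaces A's per-domain scan of all urls by a single pass over the urls that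
-- matches each url's prefixes against a set of the domains (objective: faster).

-- ===== PORT A =====
-- inner 'for url, idx in url_map.items(): if url.startswith(domain): indices[domain] = idx; break'
def pvAInner (url_map : List (String × Int)) (domain : String)
    (indices : PySem.Dict String Int) : PySem.Dict String Int :=
  match url_map with
  | [] => indices
  | (url, idx) :: rest =>
      if PySem.Str.startswith url domain then indices.insert domain idx
      else pvAInner rest domain indices

def get_domain_indices (url_map : List (String × Int)) (domains : List String) : List (String × Int) :=
  (domains.foldl (fun indices domain => pvAInner url_map domain indices) PySem.Dict.empty).items

-- ===== PORT B =====
-- inner 'for i in range(len(url)+1): p = url[:i]; if p in dset and p not in found: found[p] = idx'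
def pvBInner (dset : PySem.Set String) (url : String) (idx : Int)
    (found : PySem.Dict String Int) : PySem.Dict String Int :=
  (PySem.List.pyRange 0 ((PySem.Str.len url : Int) + 1) 1).foldl
    (fun fd i =>
      let p := PySem.Str.slice url none (some i)
      if PySem.Set.contains dset p && !(fd.contains p) then fd.insert p idx else fd)
    found

def get_domain_indices_alt (url_map : List (String × Int)) (domains : List String) : List (String × Int) :=
  let dset : PySem.Set String := PySem.Set.ofList domains
  let found : PySem.Dict String Int :=
    url_map.foldl (fun fd p => pvBInner dset p.1 p.2 fd) PySem.Dict.empty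
  (domains.foldl (fun out d =>
      match found.get? d with
      | some v => out.insert d v
      | none => out) PySem.Dict.empty).items

-- ===== PRECONDITION & SPEC =====
def Spec_get_domain_indices (url_map : List (String × Int)) (domains : List String) (out : List (String × Int)) : Prop := out = get_domain_indices_alt url_map domains
instance (url_map : List (String × Int)) (domains : List String) (out : List (String × Int)) : Decidable (Spec_get_domain_indices url_map domains out) := by unfold Spec_get_domain_indices; infer_instance

-- ===== CLAIM (what is proved, stated in full; the proofs are below) =====
def Claim_equal_get_domain_indices : Prop := ∀ (url_map : List (String × Int)) (domains : List String), Dom_get_domain_indices url_map domains → Spec_get_domain_indices url_map domains (get_domain_indices url_map domains)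

-- ===== LEMMAS AND PROOFS =====

-- effect of B's inner insert-if-fresh loop, over an arbitrary list of candidate keys
lemma get?_foldl_fresh (ps : List String) (dset : PySem.Set String) (idx : Int)
    (fd : PySem.Dict String Int) (d : String) :
    (ps.foldl (fun fd p => if PySem.Set.contains dset p && !(fd.contains p) then fd.insert p idx else fd) fd).get? d
    = if fd.get? d = none ∧ PySem.Set.contains dset d = true ∧ d ∈ ps then some idx
      else fd.get? d := by
  induction ps generalizing fd with
  | nil => simp
  | cons p ps ih =>
    simp only [List.foldl_cons, ih]
    by_cases hdp : d = p
    · subst hdp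
      by_cases hn : fd.get? d = none
      · by_cases hc : d ∈ dset
        · have hcont : fd.contains d = false := by
            rw [PySem.Dict.contains_eq_isSome_get?, hn]; rfl
          have hg : (fd.insert d idx).get? d = some idx := PySem.Dict.get?_insert_self fd d idx
          simp [hc, hcont, hg, hn]
        · simp [hc, hn]
      · have hcont : fd.contains d = true := by
          rw [PySem.Dict.contains_eq_isSome_get?]; exact Option.isSome_iff_ne_none.mpr hn
        simp [hcont, hn]
    · by_cases hstep : (PySem.Set.contains dset p && !(fd.contains p)) = true
      · simp only [hstep, if_pos]
        rw [PySem.Dict.get?_insert]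
        simp [hdp]
      · simp only [hstep]
        simp [hdp]

-- the prefixes url[:i], i = 0..len(url), are exactly the strings url startswith
lemma mem_prefixes_iff (url d : String) :
    d ∈ (PySem.List.pyRange 0 ((PySem.Str.len url : Int) + 1) 1).map
          (fun i => PySem.Str.slice url none (some i))
    ↔ PySem.Str.startswith url d = true := by
  simp only [List.mem_map, PySem.List.mem_pyRange_one]
  constructor
  · rintro ⟨i, ⟨h0, hi⟩, rfl⟩
    have ht : (PySem.Str.slice url none (some i)).toList = url.toList.take i.toNat := by
      simp [pysem, PySem.List.slice_to _ h0]
    simp [pysem, PySem.Chars.startswith_iff, ht, List.take_prefix]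
  · intro hsw
    have hpre : d.toList <+: url.toList := by
      simpa [pysem, PySem.Chars.startswith_iff] using hsw
    refine ⟨(d.toList.length : Int), ⟨by positivity, ?_⟩, ?_⟩
    · have h1 := hpre.length_le
      have h2 : d.toList.length = d.length := @String.length_toList d
      have h3 : url.toList.length = url.length := @String.length_toList url
      simp only [pysem]
      omega
    · apply String.toList_inj.mp
      have ht : (PySem.Str.slice url none (some (d.toList.length : Int))).toList
          = url.toList.take d.toList.length := by
        simp [pysem, PySem.List.slice_to_natCast]
      rw [ht, ← List.prefix_iff_eq_take.mp hpre]

-- pvBInner's effect on a single lookup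
lemma get?_pvBInner (dset : PySem.Set String) (url : String) (idx : Int)
    (fd : PySem.Dict String Int) (d : String) :
    (pvBInner dset url idx fd).get? d
    = if fd.get? d = none ∧ PySem.Set.contains dset d = true ∧ PySem.Str.startswith url d = true
      then some idx else fd.get? d := by
  have : pvBInner dset url idx fd
      = ((PySem.List.pyRange 0 ((PySem.Str.len url : Int) + 1) 1).map
          (fun i => PySem.Str.slice url none (some i))).foldl
          (fun fd p => if PySem.Set.contains dset p && !(fd.contains p) then fd.insert p idx else fd) fd := by
    rw [List.foldl_map]; rfl
  rw [this, get?_foldl_fresh]; simp only [mem_prefixes_iff]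

-- the url_map pass: found[d] is the index of the first url starting with d (for d in the set)
lemma get?_foldl_pvBInner (dset : PySem.Set String) (L : List (String × Int))
    (fd : PySem.Dict String Int) (d : String) :
    (L.foldl (fun fd p => pvBInner dset p.1 p.2 fd) fd).get? d
    = if fd.get? d = none ∧ PySem.Set.contains dset d = true
      then (L.find? (fun p => PySem.Str.startswith p.1 d)).map Prod.snd
      else fd.get? d := by
  induction L generalizing fd with
  | nil =>
    simp only [List.foldl_nil, List.find?_nil, Option.map_none]
    split_ifs with h
    · exact h.1
    · rfl
  | cons ui L ih =>
    simp only [List.foldl_cons, ih, get?_pvBInner, List.find?_cons, PySem.Str.startswith_eq,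
      PySem.Set.contains_iff]
    by_cases hn : fd.get? d = none
    · by_cases hc : d ∈ dset
      · by_cases hs : PySem.Chars.startswith ui.1.toList d.toList = true
        · simp [hn, hc, hs]
        · simp [hn, hc, hs]
      · simp [hn, hc]
    · simp [hn]

-- A's inner loop finds the first url starting with the domain
lemma pvAInner_eq_find? (L : List (String × Int)) (d : String) (ind : PySem.Dict String Int) :
    pvAInner L d ind
    = match L.find? (fun p => PySem.Str.startswith p.1 d) with
      | some p => ind.insert d p.2
      | none => ind := by
  induction L with
  | nil => simp [pvAInner]
  | cons ui L ih =>
    rw [pvAInner]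
    by_cases hs : PySem.Chars.startswith ui.1.toList d.toList = true
    · simp [hs]
    · simp [hs, ih]

lemma get_eq_alt (url_map : List (String × Int)) (domains : List String) :
    get_domain_indices url_map domains = get_domain_indices_alt url_map domains := by
  unfold get_domain_indices get_domain_indices_alt
  congr 1
  apply PySem.List.foldl_congr_mem
  intro acc d hd
  rw [pvAInner_eq_find?, get?_foldl_pvBInner]
  have hc : PySem.Set.contains (PySem.Set.ofList domains) d = true :=
    (PySem.Set.contains_iff _ d).mpr ((PySem.Set.mem_ofList domains d).mpr hd)
  simp only [PySem.Dict.get?_empty, hc, and_self, if_pos]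
  cases url_map.find? (fun p => PySem.Str.startswith p.1 d) <;> rfl

-- ===== VERDICT (by name: the statement is the Claim_ definition above) =====
theorem get_domain_indices_spec : Claim_equal_get_domain_indices := by
  intro url_map domains _
  exact get_eq_alt url_map domains
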